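-- pv_equiv track=rewrite | github.com/RokShox/Nexa | src/nexa/mcnp/input/cardLAT.py | _compress_assignments
-- ===== SOURCE A (Python) =====
-- from typing import List, Optional, Union, TextIO, Dict, Set
--
-- def _compress_assignments(assignment_list: List[int]) -> List[str]:
--     """
--     Compress consecutive identical assignments using jump notation.
--
--     Args:
--         assignment_list: List of lattice assignments
--
--     Returns:
--         List of strings with jump notation
--     """
--     if not assignment_list:
--         return []
--
--     result = []
--     i = 0
--
--     while i < len(assignment_list):
--         current_type = assignment_list[i]
--
--         # Count consecutive identical assignments
--         count = 1
--         while (i + count < len(assignment_list) and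
--                assignment_list[i + count] == current_type):
--             count += 1
--
--         # Add entry with repeat notation if needed
--         if current_type == 0:
--             # Use jump notation for non-lattice cells
--             if count == 1:
--                 result.append("J")
--             else:
--                 result.append(f"{count}J")
--         else:
--             # Regular lattice type
--             if count == 1:
--                 result.append(str(current_type))
--             else:
--                 result.append(f"{count}R {current_type}")
--
--         i += count
--
--     return result
-- ===== SOURCE B (Python) =====
-- def _compress_assignments(assignment_list):
--     def fmt(value, count):
--         if value == 0:
--             return "J" if count == 1 else f"{count}J"
--         return str(value) if count == 1 else f"{count}R {value}"
--
--     result = []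
--     run_value, run_length = None, 0
--     for value in assignment_list:
--         if run_length and value == run_value:
--             run_length += 1
--         else:
--             if run_length:
--                 result.append(fmt(run_value, run_length))
--             run_value, run_length = value, 1
--     if run_length:
--         result.append(fmt(run_value, run_length))
--     return result
-- ===== Notes on version B (the rewrite author's own statement) =====
-- stated objective: alternative
-- what changed: Replaced A's index-based outer while with a nested look-ahead counting loop by a single left-to-right fold that carries the current run (value, length) as an accumulator and flushes a formatted entry whenever the value changes.
import Mathlib
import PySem

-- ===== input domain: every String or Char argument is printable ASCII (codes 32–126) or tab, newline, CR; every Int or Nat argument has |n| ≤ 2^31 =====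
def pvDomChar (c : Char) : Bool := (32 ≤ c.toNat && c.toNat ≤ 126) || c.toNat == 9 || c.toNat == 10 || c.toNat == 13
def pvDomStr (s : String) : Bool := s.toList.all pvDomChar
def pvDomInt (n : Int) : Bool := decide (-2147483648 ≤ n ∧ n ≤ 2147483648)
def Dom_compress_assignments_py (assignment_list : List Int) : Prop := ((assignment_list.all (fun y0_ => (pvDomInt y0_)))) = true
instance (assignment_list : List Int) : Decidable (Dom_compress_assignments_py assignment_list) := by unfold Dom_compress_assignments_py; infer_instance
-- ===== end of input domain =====

-- B replaces A's index-based outer scan with inner look-ahead counting by a single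
-- fold carrying the current run (value, length); alternative decomposition, same cost.

-- ===== PORT A =====
-- the formatted entry for a run of `count` copies of `cur` (shared branch structure of both Pythons)
def pvEntry (cur : Int) (count : Nat) : String :=
  if cur = 0 then
    (if count = 1 then "J" else PySem.Int.toStr (count : Int) ++ "J")
  else
    (if count = 1 then PySem.Int.toStr cur
     else PySem.Int.toStr (count : Int) ++ "R " ++ PySem.Int.toStr cur)

-- inner while: count consecutive elements equal to cur starting at index i + count
-- (fuel only makes the loop total; with fuel = xs.length it runs exactly Python's iterations)
def pvCountA (xs : List Int) (i : Nat) (cur : Int) : Nat → Nat → Nat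
  | count, 0 => count
  | count, fuel + 1 =>
    if h : i + count < xs.length then
      if xs[i + count] = cur then pvCountA xs i cur (count + 1) fuel else count
    else count

-- outer while of A (fuel = xs.length suffices: i advances by count ≥ 1 each iteration)
def pvLoopA (xs : List Int) : Nat → List String → Nat → List String
  | _, acc, 0 => acc
  | i, acc, fuel + 1 =>
    if h : i < xs.length then
      let cur := xs[i]
      let count := pvCountA xs i cur 1 xs.length
      pvLoopA xs (i + count) (acc ++ [pvEntry cur count]) fuel
    else acc

def compress_assignments_py (assignment_list : List Int) : List String :=
  if assignment_list = [] then []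
  else pvLoopA assignment_list 0 [] assignment_list.length

-- ===== PORT B =====
-- one fold step: extend the current run or flush it and start a new one
def pvStepB (st : Option (Int × Nat) × List String) (v : Int) : Option (Int × Nat) × List String :=
  match st with
  | (some (rv, rc), acc) =>
      if v = rv then (some (rv, rc + 1), acc)
      else (some (v, 1), acc ++ [pvEntry rv rc])
  | (none, acc) => (some (v, 1), acc)

def pvFinishB (st : Option (Int × Nat) × List String) : List String :=
  match st with
  | (some (rv, rc), acc) => acc ++ [pvEntry rv rc]
  | (none, acc) => acc

def compress_assignments_py_alt (assignment_list : List Int) : List String :=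
  pvFinishB (assignment_list.foldl pvStepB (none, []))

-- ===== PRECONDITION & SPEC =====
def Spec_compress_assignments_py (assignment_list : List Int) (out : List String) : Prop := out = compress_assignments_py_alt assignment_list
instance (assignment_list : List Int) (out : List String) : Decidable (Spec_compress_assignments_py assignment_list out) := by unfold Spec_compress_assignments_py; infer_instance

-- ===== CLAIM (what is proved, stated in full; the proofs are below) =====
def Claim_equal_compress_assignments_py : Prop := ∀ (assignment_list : List Int), Dom_compress_assignments_py assignment_list → Spec_compress_assignments_py assignment_list (compress_assignments_py assignment_list)

-- ===== LEMMAS AND PROOFS =====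

-- canonical run-length recursion both ports are reduced to (fuel-guarded structural recursion)
def pvGo : Nat → List Int → List String
  | 0, _ => []
  | _ + 1, [] => []
  | fuel + 1, x :: t =>
      pvEntry x (1 + (t.takeWhile (fun y => y = x)).length)
        :: pvGo fuel (t.dropWhile (fun y => y = x))

def pvRLE (l : List Int) : List String := pvGo (l.length + 1) l

theorem pvGo_fuel (f1 : Nat) : ∀ (l : List Int) (f2 : Nat),
    l.length < f1 → l.length < f2 → pvGo f1 l = pvGo f2 l := by
  induction f1 with
  | zero => intro l f2 h1 _; exact absurd h1 (Nat.not_lt_zero _)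
  | succ f1 ih =>
      intro l f2 h1 h2
      cases l with
      | nil =>
          cases f2 with
          | zero => exact absurd h2 (Nat.not_lt_zero _)
          | succ f2 => rfl
      | cons x t =>
          cases f2 with
          | zero => exact absurd h2 (Nat.not_lt_zero _)
          | succ f2 =>
              simp only [pvGo]
              congr 1
              have hle := (t.dropWhile_sublist (fun y => y = x)).length_le
              simp only [List.length_cons] at h1 h2
              exact ih _ _ (by omega) (by omega)

theorem pvRLE_cons (x : Int) (t : List Int) :
    pvRLE (x :: t) = pvEntry x (1 + (t.takeWhile (fun y => y = x)).length)
        :: pvRLE (t.dropWhile (fun y => y = x)) := by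
  unfold pvRLE
  simp only [List.length_cons, pvGo]
  congr 1
  refine pvGo_fuel _ _ _ ?_ ?_
  · have := (t.dropWhile_sublist (fun y => y = x)).length_le
    omega
  · omega

theorem pvDrop_length_takeWhile {α : Type} (p : α → Bool) (t : List α) :
    t.drop (t.takeWhile p).length = t.dropWhile p := by
  induction t with
  | nil => simp
  | cons a t ih =>
      by_cases h : p a = true <;> simp [List.dropWhile_cons, h, ih]

theorem pvCountA_eq (xs : List Int) (i : Nat) (cur : Int) :
    ∀ (fuel count : Nat), xs.length ≤ i + count + fuel →
      pvCountA xs i cur count fuel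
        = count + ((xs.drop (i + count)).takeWhile (fun y => y = cur)).length := by
  intro fuel
  induction fuel with
  | zero =>
      intro count hf
      rw [List.drop_eq_nil_of_le (by omega)]
      simp [pvCountA]
  | succ fuel ih =>
      intro count hf
      simp only [pvCountA]
      split
      · next h =>
          rw [List.drop_eq_getElem_cons h]
          split
          · next heq =>
              rw [ih (count + 1) (by omega)]
              have h2 : i + (count + 1) = i + count + 1 := by omega
              rw [h2]
              simp only [List.takeWhile_cons, heq, decide_true, if_true, List.length_cons]
              omega
          · next hne => simp [hne]
      · next h =>
          rw [List.drop_eq_nil_of_le (by omega)]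
          simp

theorem pvLoopA_eq (xs : List Int) :
    ∀ (fuel i : Nat) (acc : List String), xs.length ≤ i + fuel →
      pvLoopA xs i acc fuel = acc ++ pvRLE (xs.drop i) := by
  intro fuel
  induction fuel with
  | zero =>
      intro i acc hf
      rw [List.drop_eq_nil_of_le (by omega)]
      simp [pvLoopA, pvRLE, pvGo]
  | succ fuel ih =>
      intro i acc hf
      simp only [pvLoopA]
      split
      · next h =>
          have hc : pvCountA xs i xs[i] 1 xs.length
              = 1 + ((xs.drop (i + 1)).takeWhile (fun y => y = xs[i])).length :=
            pvCountA_eq xs i xs[i] xs.length 1 (by omega)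
          rw [ih (i + pvCountA xs i xs[i] 1 xs.length) _ (by omega)]
          have hdrop : xs.drop i = xs[i] :: xs.drop (i + 1) := List.drop_eq_getElem_cons h
          rw [hdrop, pvRLE_cons]
          have hrest : xs.drop (i + pvCountA xs i xs[i] 1 xs.length)
              = (xs.drop (i + 1)).dropWhile (fun y => y = xs[i]) := by
            rw [← pvDrop_length_takeWhile (fun y => y = xs[i]) (xs.drop (i + 1)),
                List.drop_drop]
            congr 1
            omega
          rw [hrest, ← hc]
          simp
      · next h =>
          rw [List.drop_eq_nil_of_le (by omega)]
          simp [pvRLE, pvGo]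

-- B: folding over a run of rv just increments the counter
theorem pvFoldB_run (l : List Int) (rv : Int) (acc : List String) :
    ∀ (rc : Nat), l.foldl pvStepB (some (rv, rc), acc)
      = (l.dropWhile (fun y => y = rv)).foldl pvStepB
          (some (rv, rc + (l.takeWhile (fun y => y = rv)).length), acc) := by
  induction l with
  | nil => intro rc; simp
  | cons a t ih =>
      intro rc
      by_cases h : a = rv
      · subst h
        simp only [List.foldl_cons, pvStepB, decide_true, if_true,
          List.takeWhile_cons, List.dropWhile_cons, List.length_cons]
        have hkc : rc + 1 + (t.takeWhile (fun y => y = a)).length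
            = rc + ((t.takeWhile (fun y => y = a)).length + 1) := by omega
        rw [ih, hkc]
      · simp [List.dropWhile_cons, h]

theorem pvFoldB_eq (x : Int) (t : List Int) (acc : List String) :
    pvFinishB (t.foldl pvStepB (some (x, 1), acc)) = acc ++ pvRLE (x :: t) := by
  induction ht : t.length using Nat.strong_induction_on generalizing x t acc with
  | _ n ih =>
    rw [pvFoldB_run]
    rcases hd : t.dropWhile (fun y => y = x) with _ | ⟨y, u⟩
    · rw [pvRLE_cons, hd]
      simp [pvFinishB, pvRLE, pvGo, Nat.add_comm]
    · have hy : y ≠ x := by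
        have := List.head_dropWhile_not (fun y => decide (y = x)) (l := t)
        rw [hd] at this
        simpa using this (by simp)
      have hu : u.length < n := by
        have hle : (t.dropWhile (fun y => y = x)).length ≤ t.length :=
          (t.dropWhile_sublist _).length_le
        rw [hd] at hle; simp at hle; omega
      simp only [List.foldl_cons, pvStepB, if_neg hy]
      rw [ih u.length hu y u _ rfl]
      rw [pvRLE_cons (x := x), hd]
      simp [Nat.add_comm]

-- ===== VERDICT (by name: the statement is the Claim_ definition above) =====
theorem compress_assignments_py_spec : Claim_equal_compress_assignments_py := by
  intro xs _
  unfold Spec_compress_assignments_py compress_assignments_py compress_assignments_py_alt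
  cases xs with
  | nil => simp [pvFinishB]
  | cons x t =>
      simp only [if_neg (List.cons_ne_nil x t)]
      rw [pvLoopA_eq (x :: t) (x :: t).length 0 [] (by omega), List.drop_zero,
        List.foldl_cons]
      simp only [pvStepB]
      rw [pvFoldB_eq]
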